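-- pv_equiv track=rewrite | github.com/anishfelixm/100daysofCP | python/61c_1497A_Meximization.py | solve
-- ===== SOURCE A (Python) =====
-- def solve(arr, n):
--     ans = []
--     arr.sort()
--     for i in range(n):
--         if arr[i] != arr[i-1]:
--             ans.append(arr[i])
--     for i in range(n):
--         if arr[i] == arr[i-1]:
--             ans.append(arr[i])
--     return ans
-- ===== SOURCE B (Python) =====
-- def solve(arr, n):
--     # Like A, sorts arr in place (same observable mutation).
--     arr.sort()
--     seen = set()
--     distinct = []
--     dup = []
--     for i in range(n):
--         v = arr[i]
--         if v in seen:
--             dup.append(v)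
--         else:
--             seen.add(v)
--             distinct.append(v)
--     return distinct + dup
-- ===== Notes on version B (the rewrite author's own statement) =====
-- stated objective: simpler
-- what changed: Replaces A's two adjacency-comparison passes (with the arr[-1] wraparound at i=0) by one pass over range(n) that splits each element into 'distinct'/'dup' accumulators via a seen-set, then returns distinct + dup.
import Mathlib
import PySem

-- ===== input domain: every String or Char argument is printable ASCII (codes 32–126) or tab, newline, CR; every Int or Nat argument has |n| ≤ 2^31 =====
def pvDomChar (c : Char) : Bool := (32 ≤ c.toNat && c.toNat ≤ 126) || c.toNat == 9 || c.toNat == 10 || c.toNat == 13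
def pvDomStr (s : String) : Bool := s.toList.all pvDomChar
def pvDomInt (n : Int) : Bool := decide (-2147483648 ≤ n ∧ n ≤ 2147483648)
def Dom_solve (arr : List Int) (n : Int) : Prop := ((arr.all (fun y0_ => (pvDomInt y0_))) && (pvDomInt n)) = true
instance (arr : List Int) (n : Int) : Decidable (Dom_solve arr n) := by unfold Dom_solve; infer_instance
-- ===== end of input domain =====

-- B replaces A's two adjacency-comparison passes by one pass with a seen-set and two
-- accumulators (simpler, same cost); both Pythons sort arr in place — the equivalence
-- proved here is about the return value (B performs the same mutation).

-- ===== PORT A =====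
def solve (arr : List Int) (n : Int) : List Int :=
  let s := PySem.List.sorted arr (fun x => x) false
  let ans := (PySem.List.pyRange 0 n 1).foldl
    (fun ans i => if PySem.List.pyGetD s i 0 ≠ PySem.List.pyGetD s (i-1) 0
                  then ans ++ [PySem.List.pyGetD s i 0] else ans) ([] : List Int)
  (PySem.List.pyRange 0 n 1).foldl
    (fun ans i => if PySem.List.pyGetD s i 0 = PySem.List.pyGetD s (i-1) 0
                  then ans ++ [PySem.List.pyGetD s i 0] else ans) ans

-- ===== PORT B =====
def solve_alt (arr : List Int) (n : Int) : List Int :=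
  let s := PySem.List.sorted arr (fun x => x) false
  let st := (PySem.List.pyRange 0 n 1).foldl
    (fun (p : PySem.Set Int × List Int × List Int) i =>
      let v := PySem.List.pyGetD s i 0
      if PySem.Set.contains p.1 v then (p.1, p.2.1, p.2.2 ++ [v])
      else (PySem.Set.add p.1 v, p.2.1 ++ [v], p.2.2))
    (PySem.Set.empty, ([] : List Int), ([] : List Int))
  st.2.1 ++ st.2.2

-- ===== PRECONDITION & SPEC =====
-- Pre_ excludes exactly the inputs where Python A raises IndexError: n > len(arr)
-- (arr[i] out of range; B raises there too).
def Pre_solve (arr : List Int) (n : Int) : Prop := n ≤ (arr.length : Int) ∨ n ≤ 0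
instance (arr : List Int) (n : Int) : Decidable (Pre_solve arr n) := by unfold Pre_solve; infer_instance
def pvWitness_solve : List Int × Int := ([3, 1, 3, 2], 4)

def Spec_solve (arr : List Int) (n : Int) (out : List Int) : Prop := out = solve_alt arr n
instance (arr : List Int) (n : Int) (out : List Int) : Decidable (Spec_solve arr n out) := by unfold Spec_solve; infer_instance

-- ===== CLAIM (what is proved, stated in full; the proofs are below) =====
def Claim_equal_solve : Prop := ∀ (arr : List Int) (n : Int), Dom_solve arr n → Pre_solve arr n → Spec_solve arr n (solve arr n)

-- ===== LEMMAS AND PROOFS =====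

-- step functions of the three loops (abbreviations for the proofs only)
def gA1 (s : List Int) (ans : List Int) (i : Int) : List Int :=
  if PySem.List.pyGetD s i 0 ≠ PySem.List.pyGetD s (i-1) 0
  then ans ++ [PySem.List.pyGetD s i 0] else ans

def gA2 (s : List Int) (ans : List Int) (i : Int) : List Int :=
  if PySem.List.pyGetD s i 0 = PySem.List.pyGetD s (i-1) 0
  then ans ++ [PySem.List.pyGetD s i 0] else ans

def gB (s : List Int) (p : PySem.Set Int × List Int × List Int) (i : Int) :
    PySem.Set Int × List Int × List Int :=
  let v := PySem.List.pyGetD s i 0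
  if PySem.Set.contains p.1 v then (p.1, p.2.1, p.2.2 ++ [v])
  else (PySem.Set.add p.1 v, p.2.1 ++ [v], p.2.2)

lemma solve_eq (arr : List Int) (n : Int) :
    solve arr n =
      (PySem.List.pyRange 0 n 1).foldl (gA2 (PySem.List.sorted arr (fun x => x) false))
        ((PySem.List.pyRange 0 n 1).foldl (gA1 (PySem.List.sorted arr (fun x => x) false)) []) := rfl

lemma solve_alt_eq (arr : List Int) (n : Int) :
    solve_alt arr n =
      (((PySem.List.pyRange 0 n 1).foldl (gB (PySem.List.sorted arr (fun x => x) false))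
        (PySem.Set.empty, [], [])).2.1)
      ++ (((PySem.List.pyRange 0 n 1).foldl (gB (PySem.List.sorted arr (fun x => x) false))
        (PySem.Set.empty, [], [])).2.2) := rfl

-- pairwise ≤ gives index-monotonicity
lemma getElem_mono (s : List Int) (hs : s.Pairwise (· ≤ ·)) {i j : Nat}
    (hij : i ≤ j) (hj : j < s.length) : s[i]'(by omega) ≤ s[j] := by
  rcases Nat.lt_or_ge i j with h | h
  · exact (List.pairwise_iff_getElem.mp hs) i j (by omega) hj h
  · have : i = j := by omega
    subst this; exact le_refl _

-- on a sorted list, "s[m] already seen among the first m" ↔ "s[m] = s[m-1]"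
lemma mem_take_iff (s : List Int) (hs : s.Pairwise (· ≤ ·)) (m : Nat)
    (h1 : 1 ≤ m) (hm : m < s.length) :
    s[m] ∈ s.take m ↔ s[m] = s[m-1]'(by omega) := by
  constructor
  · intro hmem
    obtain ⟨j, hj, hget⟩ := List.getElem_of_mem hmem
    rw [List.getElem_take] at hget
    have hjlt : j < m := by have := hj; simp [List.length_take] at this; omega
    have h1' : s[j]'(by omega) ≤ s[m-1]'(by omega) := getElem_mono s hs (by omega) (by omega)
    have h2' : s[m-1]'(by omega) ≤ s[m] := getElem_mono s hs (by omega) hm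
    omega
  · intro h
    have : s[m-1]'(by omega) ∈ s.take m := by
      have : (s.take m)[m-1]'(by simp [List.length_take]; omega) = s[m-1]'(by omega) :=
        List.getElem_take
      rw [← this]; exact List.getElem_mem _
    rwa [h]

-- main invariant, non-constant case: the single pass computes exactly A's two passes
lemma main1 (s : List Int) (hs : s.Pairwise (· ≤ ·))
    (hne : PySem.List.pyGetD s 0 0 ≠ PySem.List.pyGetD s (-1) 0) :
    ∀ m : Nat, m ≤ s.length →
    (PySem.List.pyRange 0 (m : Int) 1).foldl (gB s) (PySem.Set.empty, [], [])
      = (PySem.Set.ofList (s.take m),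
         (PySem.List.pyRange 0 (m : Int) 1).foldl (gA1 s) [],
         (PySem.List.pyRange 0 (m : Int) 1).foldl (gA2 s) []) := by
  intro m
  induction m with
  | zero =>
    intro _
    simp [PySem.List.pyRange_one_eq_nil (by norm_num : (0:Int) ≤ 0)]
  | succ m ih =>
    intro hm1
    have hmlt : m < s.length := by omega
    have hcast : ((m+1 : Nat) : Int) = (m : Int) + 1 := by push_cast; ring
    rw [hcast, PySem.List.pyRange_one_succ_right (by positivity)]
    rw [List.foldl_append, List.foldl_append, List.foldl_append, ih (by omega)]
    simp only [List.foldl_cons, List.foldl_nil]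
    have hv : PySem.List.pyGetD s ((m:Int)) 0 = s[m] := by
      rw [PySem.List.pyGetD_eq_getElem s 0 (by positivity) (by exact_mod_cast hmlt)]; simp
    have htake : s.take (m+1) = s.take m ++ [s[m]] := by
      rw [List.take_add_one]; simp [List.getElem?_eq_getElem hmlt]
    have hof : PySem.Set.ofList (s.take (m+1)) = PySem.Set.add (PySem.Set.ofList (s.take m)) s[m] := by
      rw [htake, PySem.Set.ofList_append_singleton]
    by_cases hmem : s[m] ∈ s.take m
    · have hm1' : 1 ≤ m := by
        rcases Nat.eq_zero_or_pos m with h | h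
        · subst h; simp at hmem
        · exact h
      have hprevlt : m - 1 < s.length := by omega
      have hprev : PySem.List.pyGetD s ((m:Int) - 1) 0 = s[m-1] := by
        have hid : ((m:Int) - 1) = ((m-1 : Nat) : Int) := by omega
        rw [hid, PySem.List.pyGetD_natCast, List.getD_eq_getElem _ _ hprevlt]
      have heq : s[m] = s[m-1] := (mem_take_iff s hs m hm1' hmlt).mp hmem
      have hcontains : PySem.Set.contains (PySem.Set.ofList (s.take m)) s[m] = true := by
        rw [PySem.Set.contains_iff]; exact (PySem.Set.mem_ofList _ _).mpr hmem
      have haddmem : PySem.Set.add (PySem.Set.ofList (s.take m)) s[m] = PySem.Set.ofList (s.take m) :=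
        PySem.Set.add_of_mem ((PySem.Set.mem_ofList _ _).mpr hmem)
      simp only [gB, gA1, gA2, hv, hprev, hcontains]
      rw [if_pos trivial, if_neg (by simp [heq]), if_pos heq, hof, haddmem]
    · have hcontains : PySem.Set.contains (PySem.Set.ofList (s.take m)) s[m] = false := by
        rw [Bool.eq_false_iff]
        intro h
        exact hmem ((PySem.Set.mem_ofList _ _).mp ((PySem.Set.contains_iff _ _).mp h))
      rcases Nat.eq_zero_or_pos m with hm0 | hm0
      · subst hm0
        have hzero : ((0:Nat):Int) - 1 = -1 := by norm_num
        have hv0 : PySem.List.pyGetD s ((0:Nat):Int) 0 = PySem.List.pyGetD s 0 0 := by norm_num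
        have hne' : s[0] ≠ PySem.List.pyGetD s (((0:Nat):Int) - 1) 0 := by
          rw [hzero, ← hv, hv0]; exact hne
        simp only [gB, gA1, gA2, hv, hcontains]
        rw [if_neg (by simp), if_pos hne', if_neg (by simpa using hne'), hof]
      · have hprevlt : m - 1 < s.length := by omega
        have hprev : PySem.List.pyGetD s ((m:Int) - 1) 0 = s[m-1] := by
          have hid : ((m:Int) - 1) = ((m-1 : Nat) : Int) := by omega
          rw [hid, PySem.List.pyGetD_natCast, List.getD_eq_getElem _ _ hprevlt]
        have hneq : s[m] ≠ s[m-1] := fun h => hmem ((mem_take_iff s hs m hm0 hmlt).mpr h)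
        simp only [gB, gA1, gA2, hv, hprev, hcontains]
        rw [if_neg (by simp), if_pos hneq, if_neg hneq, hof]

-- constant case: head = last on a sorted list forces all elements equal
lemma const_elems (s : List Int) (hs : s.Pairwise (· ≤ ·)) (hne : s ≠ [])
    (hc : PySem.List.pyGetD s 0 0 = PySem.List.pyGetD s (-1) 0) :
    ∀ j (h : j < s.length), s[j] = s[0]'(by cases s; simp at hne; simp) := by
  intro j hj
  have hlen : 0 < s.length := List.length_pos_iff.mpr hne
  have h0 : PySem.List.pyGetD s 0 0 = s[0]'(hlen) := by
    have h : ((0:Nat):Int) = (0:Int) := by norm_num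
    rw [← h, PySem.List.pyGetD_natCast, List.getD_eq_getElem _ _ hlen]
  have hlast : PySem.List.pyGetD s (-1) 0 = s[s.length - 1]'(by omega) := by
    rw [PySem.List.pyGetD_neg_one s 0 hne, List.getLast_eq_getElem]
  have hle1 : s[0]'(hlen) ≤ s[j] := getElem_mono s hs (Nat.zero_le _) hj
  have hle2 : s[j] ≤ s[s.length - 1]'(by omega) := getElem_mono s hs (by omega) (by omega)
  have : s[0]'(hlen) = s[s.length - 1]'(by omega) := by rw [← h0, ← hlast, hc]
  omega

lemma pyGetD_zero_getElem (s : List Int) (hlen : 0 < s.length) :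
    PySem.List.pyGetD s 0 0 = s[0]'(hlen) := by
  have h : ((0:Nat):Int) = (0:Int) := by norm_num
  rw [← h, PySem.List.pyGetD_natCast, List.getD_eq_getElem _ _ hlen]

lemma main2A (s : List Int) (hs : s.Pairwise (· ≤ ·)) (hne : s ≠ [])
    (hc : PySem.List.pyGetD s 0 0 = PySem.List.pyGetD s (-1) 0) :
    ∀ m : Nat, m ≤ s.length →
    (PySem.List.pyRange 0 (m : Int) 1).foldl (gA2 s)
      ((PySem.List.pyRange 0 (m : Int) 1).foldl (gA1 s) [])
      = List.replicate m (PySem.List.pyGetD s 0 0) := by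
  intro m hm
  have hlen : 0 < s.length := List.length_pos_iff.mpr hne
  have hconst : ∀ i : Int, 0 ≤ i → i < (m:Int) →
      PySem.List.pyGetD s i 0 = PySem.List.pyGetD s 0 0 ∧
      PySem.List.pyGetD s (i-1) 0 = PySem.List.pyGetD s 0 0 := by
    intro i h0 hi
    constructor
    · have hilt : i.toNat < s.length := by omega
      rw [PySem.List.pyGetD_eq_getElem s 0 h0 (by omega), pyGetD_zero_getElem s hlen]
      exact const_elems s hs hne hc _ hilt
    · rcases eq_or_lt_of_le h0 with h | h
      · rw [← h]; norm_num; exact hc.symm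
      · have hprevlt : (i-1).toNat < s.length := by omega
        rw [PySem.List.pyGetD_eq_getElem s 0 (by omega) (by omega), pyGetD_zero_getElem s hlen]
        exact const_elems s hs hne hc _ hprevlt
  unfold gA1 gA2
  rw [PySem.List.foldl_append_ite
        (p := fun i => PySem.List.pyGetD s i 0 ≠ PySem.List.pyGetD s (i-1) 0)
        (f := fun i => PySem.List.pyGetD s i 0),
      PySem.List.foldl_append_ite
        (p := fun i => PySem.List.pyGetD s i 0 = PySem.List.pyGetD s (i-1) 0)
        (f := fun i => PySem.List.pyGetD s i 0)]
  have hfilter1 : (PySem.List.pyRange 0 (m:Int) 1).filter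
      (fun i => decide (PySem.List.pyGetD s i 0 ≠ PySem.List.pyGetD s (i-1) 0)) = [] := by
    rw [List.filter_eq_nil_iff]
    intro i hi
    rw [PySem.List.mem_pyRange_one] at hi
    obtain ⟨hA, hB⟩ := hconst i hi.1 hi.2
    simp [hA, hB]
  have hfilter2 : (PySem.List.pyRange 0 (m:Int) 1).filter
      (fun i => decide (PySem.List.pyGetD s i 0 = PySem.List.pyGetD s (i-1) 0)) =
      PySem.List.pyRange 0 (m:Int) 1 := by
    rw [List.filter_eq_self]
    intro i hi
    rw [PySem.List.mem_pyRange_one] at hi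
    obtain ⟨hA, hB⟩ := hconst i hi.1 hi.2
    simp [hA, hB]
  rw [hfilter1, hfilter2]
  simp only [List.map_nil, List.nil_append, List.append_nil]
  rw [List.eq_replicate_iff]
  constructor
  · rw [List.length_map, PySem.List.length_pyRange_one]; omega
  · intro b hb
    obtain ⟨i, hi, hfb⟩ := List.mem_map.mp hb
    rw [PySem.List.mem_pyRange_one] at hi
    rw [← hfb]
    exact (hconst i hi.1 hi.2).1

lemma main2B_state (s : List Int) (hs : s.Pairwise (· ≤ ·)) (hne : s ≠ [])
    (hc : PySem.List.pyGetD s 0 0 = PySem.List.pyGetD s (-1) 0) :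
    ∀ m : Nat, 1 ≤ m → m ≤ s.length →
    (PySem.List.pyRange 0 (m : Int) 1).foldl (gB s) (PySem.Set.empty, [], [])
      = ([PySem.List.pyGetD s 0 0], [PySem.List.pyGetD s 0 0],
         List.replicate (m-1) (PySem.List.pyGetD s 0 0)) := by
  intro m
  induction m with
  | zero => omega
  | succ m ih =>
    intro _ hm
    have hlen : 0 < s.length := List.length_pos_iff.mpr hne
    have hv : ∀ k : Nat, k < s.length →
        PySem.List.pyGetD s ((k:Int)) 0 = PySem.List.pyGetD s 0 0 := by
      intro k hk
      rw [PySem.List.pyGetD_eq_getElem s 0 (by positivity) (by exact_mod_cast hk),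
        pyGetD_zero_getElem s hlen]
      exact const_elems s hs hne hc _ (by omega)
    rcases Nat.eq_zero_or_pos m with hm0 | hm0
    · subst hm0
      have h1 : ((1:Nat):Int) = 0 + 1 := by norm_num
      rw [h1, PySem.List.pyRange_one_singleton]
      simp only [List.foldl_cons, List.foldl_nil, gB]
      rw [if_neg (by simp [PySem.Set.empty, PySem.Set.contains])]
      rfl
    · have hcast : ((m+1 : Nat) : Int) = (m : Int) + 1 := by push_cast; ring
      rw [hcast, PySem.List.pyRange_one_succ_right (by positivity), List.foldl_append,
        ih hm0 (by omega)]
      simp only [List.foldl_cons, List.foldl_nil, gB]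
      have hvm := hv m (by omega)
      have hcont : PySem.Set.contains [PySem.List.pyGetD s 0 0] (PySem.List.pyGetD s 0 0) = true := by
        rw [PySem.Set.contains_iff]; simp
      rw [hvm, if_pos hcont]
      have hrep : List.replicate (m-1) (PySem.List.pyGetD s 0 0) ++ [PySem.List.pyGetD s 0 0]
          = List.replicate m (PySem.List.pyGetD s 0 0) := by
        rw [← List.replicate_succ']
        congr 1
        omega
      rw [hrep]
      simp

lemma main2B (s : List Int) (hs : s.Pairwise (· ≤ ·)) (hne : s ≠ [])
    (hc : PySem.List.pyGetD s 0 0 = PySem.List.pyGetD s (-1) 0) :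
    ∀ m : Nat, m ≤ s.length →
    (((PySem.List.pyRange 0 (m : Int) 1).foldl (gB s) (PySem.Set.empty, [], [])).2.1)
    ++ (((PySem.List.pyRange 0 (m : Int) 1).foldl (gB s) (PySem.Set.empty, [], [])).2.2)
      = List.replicate m (PySem.List.pyGetD s 0 0) := by
  intro m hm
  rcases Nat.eq_zero_or_pos m with hm0 | hm0
  · subst hm0
    simp [PySem.List.pyRange_one_eq_nil (by norm_num : (0:Int) ≤ 0)]
  · rw [main2B_state s hs hne hc m hm0 hm]
    show [PySem.List.pyGetD s 0 0] ++ List.replicate (m-1) (PySem.List.pyGetD s 0 0) = _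
    rw [List.singleton_append, ← List.replicate_succ]
    congr 1
    omega

-- A's second loop with an arbitrary initial accumulator splits off
lemma gA2_init_split (s : List Int) (l : List Int) (init : List Int) :
    l.foldl (gA2 s) init = init ++ l.foldl (gA2 s) [] := by
  unfold gA2
  rw [PySem.List.foldl_append_ite
        (p := fun i => PySem.List.pyGetD s i 0 = PySem.List.pyGetD s (i-1) 0)
        (f := fun i => PySem.List.pyGetD s i 0),
      PySem.List.foldl_append_ite
        (p := fun i => PySem.List.pyGetD s i 0 = PySem.List.pyGetD s (i-1) 0)
        (f := fun i => PySem.List.pyGetD s i 0)]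
  simp

-- ===== VERDICT (by name: the statement is the Claim_ definition above) =====
theorem solve_spec : Claim_equal_solve := by
  intro arr n _hDom hPre
  unfold Spec_solve
  rw [solve_eq, solve_alt_eq]
  set s := PySem.List.sorted arr (fun x => x) false with hsdef
  have hs : s.Pairwise (· ≤ ·) := PySem.List.sorted_pairwise arr (fun x => x)
  have hlen : s.length = arr.length := PySem.List.length_sorted arr _ _
  by_cases hn : n ≤ 0
  · rw [PySem.List.pyRange_one_eq_nil hn]; simp
  · replace hn : 0 < n := by omega
    have hnlen : n ≤ (arr.length : Int) := by
      rcases hPre with h | h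
      · exact h
      · omega
    have hmn : n = ((n.toNat : Nat) : Int) := by omega
    set m := n.toNat with hm
    have hmlen : m ≤ s.length := by omega
    rw [hmn]
    by_cases hc : PySem.List.pyGetD s 0 0 = PySem.List.pyGetD s (-1) 0
    · have hne : s ≠ [] := by
        intro h; rw [h] at hmlen; simp at hmlen; omega
      rw [main2A s hs hne hc m hmlen, main2B s hs hne hc m hmlen]
    · rw [main1 s hs hc m hmlen, gA2_init_split]
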